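-- pv_equiv track=rewrite | github.com/Unbabel/COMET | comet/models/utils.py | split_sequence_into_sublists
-- ===== SOURCE A (Python) =====
-- def split_sequence_into_sublists(sequence, n):
--     elements_per_chunk, remainder = divmod(len(sequence), n)
--     return [
--         sequence[
--             i * elements_per_chunk
--             + min(i, remainder) : (i + 1) * elements_per_chunk
--             + min(i + 1, remainder)
--         ]
--         for i in range(n)
--     ]
-- ===== SOURCE B (Python) =====
-- def split_sequence_into_sublists(sequence, n):
--     q, r = divmod(len(sequence), n)
--     sizes = [q + 1] * r + [q] * (n - r)
--     it = iter(sequence)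
--     return [[next(it) for _ in range(size)] for size in sizes]
-- ===== Notes on version B (the rewrite author's own statement) =====
-- stated objective: alternative
-- what changed: B drops A's closed-form slice-boundary arithmetic entirely: it first materialises the list of chunk sizes ([q+1]*r + [q]*(n-r)) and then fills each chunk by consuming elements one at a time from a shared iterator over the sequence, so no per-chunk index or min() computation exists.
import Mathlib
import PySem

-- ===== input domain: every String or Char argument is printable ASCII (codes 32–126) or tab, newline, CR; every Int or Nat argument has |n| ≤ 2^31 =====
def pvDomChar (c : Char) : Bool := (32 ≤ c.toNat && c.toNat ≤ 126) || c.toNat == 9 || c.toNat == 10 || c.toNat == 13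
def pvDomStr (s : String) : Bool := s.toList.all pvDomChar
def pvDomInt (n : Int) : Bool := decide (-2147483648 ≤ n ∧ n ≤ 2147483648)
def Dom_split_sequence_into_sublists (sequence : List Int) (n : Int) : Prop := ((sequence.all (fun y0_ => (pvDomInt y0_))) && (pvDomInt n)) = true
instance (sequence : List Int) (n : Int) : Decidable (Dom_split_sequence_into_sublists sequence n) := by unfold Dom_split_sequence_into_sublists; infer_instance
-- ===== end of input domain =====

-- B is a two-stage re-implementation: it first materialises the list of chunk sizes ([q+1]*r ++ [q]*(n-r)) and then fills the chunks by consuming the elements one at a time from the front of the sequence (Python iterator), instead of A's closed-form slice-boundary arithmetic; alternative decomposition, same cost.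


-- ===== PORT A =====
def split_sequence_into_sublists (sequence : List Int) (n : Int) : List (List Int) :=
  match PySem.Int.divmod? (PySem.List.len sequence) n with
  | none => []  -- n = 0: Python raises ZeroDivisionError; excluded by Pre_
  | some (elements_per_chunk, remainder) =>
      (PySem.List.pyRange 0 n 1).map (fun i =>
        PySem.List.slice sequence
          (some (i * elements_per_chunk + min i remainder))
          (some ((i + 1) * elements_per_chunk + min (i + 1) remainder)))

-- ===== PORT B =====
-- 'next(it)' of Source B: the iterator state is the not-yet-consumed suffix of the sequence.
-- On an exhausted iterator Python would raise StopIteration; that point is unreachable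
-- for the sizes Source B builds (their sum never exceeds the length), so the [] branch is dead code.
def pvNext (p : List Int × List Int) (_ : Int) : List Int × List Int :=
  match p.1 with
  | [] => p
  | x :: rest => (rest, p.2 ++ [x])

-- one iteration of Source B's outer comprehension: consume `size` elements into a fresh chunk
def pvChunk (st : List Int × List (List Int)) (size : Int) : List Int × List (List Int) :=
  let inner := (PySem.List.pyRange 0 size 1).foldl pvNext (st.1, ([] : List Int))
  (inner.1, st.2 ++ [inner.2])

def split_sequence_into_sublists_alt (sequence : List Int) (n : Int) : List (List Int) :=
  match PySem.Int.divmod? (PySem.List.len sequence) n with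
  | none => []  -- n = 0: divmod raises in Source B too; excluded by Pre_
  | some (q, r) =>
      let sizes := PySem.List.pyRepeat [q + 1] r ++ PySem.List.pyRepeat [q] (n - r)
      (sizes.foldl pvChunk (sequence, ([] : List (List Int)))).2

-- ===== PRECONDITION & SPEC =====
-- n = 0 makes divmod raise ZeroDivisionError in both programs.
def Pre_split_sequence_into_sublists (sequence : List Int) (n : Int) : Prop := n ≠ 0
instance (sequence : List Int) (n : Int) : Decidable (Pre_split_sequence_into_sublists sequence n) := by unfold Pre_split_sequence_into_sublists; infer_instance
def pvWitness_split_sequence_into_sublists : List Int × Int := ([1, 2, 3, 4, 5], 2)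

def Spec_split_sequence_into_sublists (sequence : List Int) (n : Int) (out : List (List Int)) : Prop := out = split_sequence_into_sublists_alt sequence n
instance (sequence : List Int) (n : Int) (out : List (List Int)) : Decidable (Spec_split_sequence_into_sublists sequence n out) := by unfold Spec_split_sequence_into_sublists; infer_instance

-- ===== CLAIM (what is proved, stated in full; the proofs are below) =====
def Claim_equal_split_sequence_into_sublists : Prop := ∀ (sequence : List Int) (n : Int), Dom_split_sequence_into_sublists sequence n → Pre_split_sequence_into_sublists sequence n → Spec_split_sequence_into_sublists sequence n (split_sequence_into_sublists sequence n)

-- ===== LEMMAS AND PROOFS =====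

-- the inner comprehension consumes min(len, #iterations) elements front-to-back
lemma pvNext_foldl : ∀ (l : List Int) (rem acc : List Int),
    l.foldl pvNext (rem, acc) = (rem.drop l.length, acc ++ rem.take l.length) := by
  intro l
  induction l with
  | nil => intro rem acc; simp
  | cons e l ih =>
      intro rem acc
      cases rem with
      | nil =>
          simp only [List.foldl_cons, pvNext]
          simpa using ih [] acc
      | cons x rest =>
          simp only [List.foldl_cons, pvNext]
          rw [ih rest (acc ++ [x])]
          simp

-- specification of the outer fold: sequential take/drop chunking
def pvGo (rem : List Int) : List Int → List (List Int)
  | [] => []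
  | s :: ss => rem.take s.toNat :: pvGo (rem.drop s.toNat) ss

lemma pvChunk_foldl : ∀ (sizes : List Int) (rem : List Int) (acc : List (List Int)),
    (sizes.foldl pvChunk (rem, acc)).2 = acc ++ pvGo rem sizes := by
  intro sizes
  induction sizes with
  | nil => intro rem acc; simp [pvGo]
  | cons s ss ih =>
      intro rem acc
      simp only [List.foldl_cons, pvChunk, pvNext_foldl, PySem.List.length_pyRange_one]
      rw [ih]
      simp [pvGo]

-- cursor invariant: the sequential chunking from cursor i*q + min i r over the size
-- suffix for chunks i..n-1 yields exactly A's closed-form slices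
lemma pvGo_eq_mapA (sequence : List Int) (q r : Int) (hq : 0 ≤ q) (hr : 0 ≤ r) :
    ∀ (k : Nat) (i n : Int), 0 ≤ i → r ≤ n → (n - i).toNat = k →
      pvGo (sequence.drop (i * q + min i r).toNat)
          (List.replicate (r - i).toNat (q + 1) ++ List.replicate (n - max i r).toNat q)
        = (PySem.List.pyRange i n 1).map (fun j =>
            PySem.List.slice sequence (some (j * q + min j r))
              (some ((j + 1) * q + min (j + 1) r))) := by
  intro k
  induction k with
  | zero =>
      intro i n hi hrn hk
      rw [PySem.List.pyRange_one_eq_nil (by omega)]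
      have h1 : (r - i).toNat = 0 := by omega
      have h2 : (n - max i r).toNat = 0 := by
        rcases le_total i r with h | h
        · rw [max_eq_right h]; omega
        · rw [max_eq_left h]; omega
      rw [h1, h2]
      simp [pvGo]
  | succ k ih =>
      intro i n hi hrn hk
      have hin : i < n := by omega
      have hstart : 0 ≤ i * q + min i r := by
        have : 0 ≤ i * q := mul_nonneg hi hq
        rcases le_total i r with h | h
        · rw [min_eq_left h]; omega
        · rw [min_eq_right h]; omega
      rw [PySem.List.pyRange_one_cons hin, List.map_cons]
      rcases lt_or_ge i r with hir | hir
      · -- chunk i has size q + 1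
        have hnext : i * q + min i r + (q + 1) = (i + 1) * q + min (i + 1) r := by
          rw [min_eq_left (by omega), min_eq_left (by omega)]; ring
        have hrep : (r - i).toNat = (r - (i + 1)).toNat + 1 := by omega
        rw [hrep, List.replicate_succ, List.cons_append]
        simp only [pvGo]
        rw [← hnext, PySem.List.slice_toNat sequence hstart (by omega)]
        congr 1
        · -- head chunk = A's slice for index i
          congr 1
          omega
        · -- tail: shift the cursor and apply the IH at i+1
          rw [List.drop_drop]
          have hmax : n - max i r = n - max (i + 1) r := by
            rw [max_eq_right (le_of_lt hir), max_eq_right (by omega)]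
          rw [hmax, show (i * q + min i r).toNat + (q + 1).toNat =
              ((i + 1) * q + min (i + 1) r).toNat by omega]
          exact ih (i + 1) n (by omega) hrn (by omega)
      · -- chunk i has size q
        have hnext : i * q + min i r + q = (i + 1) * q + min (i + 1) r := by
          rw [min_eq_right (by omega), min_eq_right (by omega)]; ring
        have h1 : (r - i).toNat = 0 := by omega
        have h2 : (n - max i r).toNat = (n - max (i + 1) r).toNat + 1 := by
          rw [max_eq_left (by omega), max_eq_left (by omega)]; omega
        rw [h1, List.replicate_zero, List.nil_append, h2, List.replicate_succ]
        simp only [pvGo]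
        rw [← hnext, PySem.List.slice_toNat sequence hstart (by omega)]
        congr 1
        · congr 1
          omega
        · rw [List.drop_drop]
          rw [show (i * q + min i r).toNat + q.toNat =
              ((i + 1) * q + min (i + 1) r).toNat by omega]
          have := ih (i + 1) n (by omega) hrn (by omega)
          rwa [show (r - (i + 1)).toNat = 0 by omega, List.replicate_zero,
               List.nil_append] at this

-- ===== VERDICT (by name: the statement is the Claim_ definition above) =====
theorem split_sequence_into_sublists_spec : Claim_equal_split_sequence_into_sublists := by
  intro sequence n _ hn
  replace hn : n ≠ 0 := hn
  unfold Spec_split_sequence_into_sublists split_sequence_into_sublists split_sequence_into_sublists_alt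
  have hd : PySem.Int.divmod? (PySem.List.len sequence) n =
      some (PySem.Int.floordiv (PySem.List.len sequence) n,
            PySem.Int.mod (PySem.List.len sequence) n) := by
    simp [PySem.Int.divmod?, PySem.Int.floordiv, PySem.Int.mod]; exact hn
  rw [hd]
  rcases lt_or_ge n 0 with hneg | hpos
  · -- n < 0: A's range and B's sizes are both empty
    have hb := PySem.Int.mod_neg_bounds (a := PySem.List.len sequence) hneg
    rw [PySem.List.pyRange_one_eq_nil (by omega)]
    simp only [PySem.List.pyRepeat_singleton]
    rw [show (PySem.Int.mod (PySem.List.len sequence) n).toNat = 0 by omega,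
        show (n - PySem.Int.mod (PySem.List.len sequence) n).toNat = 0 by omega]
    simp
  · have hpos : 0 < n := by omega
    set q := PySem.Int.floordiv (PySem.List.len sequence) n with hqdef
    set r := PySem.Int.mod (PySem.List.len sequence) n with hrdef
    have hq : 0 ≤ q := by
      rw [hqdef, PySem.Int.floordiv_eq_ediv_of_pos hpos]
      exact Int.ediv_nonneg (by simp [PySem.List.len]) (by omega)
    have hr : 0 ≤ r := PySem.Int.mod_nonneg _ hpos
    have hrn : r ≤ n := le_of_lt (PySem.Int.mod_lt _ hpos)
    simp only [PySem.List.pyRepeat_singleton]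
    rw [pvChunk_foldl]
    have h := pvGo_eq_mapA sequence q r hq hr (n - 0).toNat 0 n le_rfl hrn rfl
    rw [show (0 * q + min 0 r).toNat = 0 by rw [min_eq_left hr]; simp] at h
    simp only [List.drop_zero] at h
    rw [show (r : Int) - 0 = r by ring, show max 0 r = r from max_eq_right hr] at h
    simpa using h.symm
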